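-- pv_equiv track=rewrite | github.com/tonyswartz/atlas | tools/bambu/bambu_prompt_poller.py | find_best_spool_with_ams
-- ===== SOURCE A (Python) =====
-- def normalize_hex(s: str | None) -> str | None:
--     if not s:
--         return None
--     s = s.strip().lstrip("#")
--     return s.upper()
--
-- def hex_to_rgb(h: str | None) -> tuple[int, int, int] | None:
--     h = normalize_hex(h)
--     if not h or len(h) < 6:
--         return None
--     h = h[:6]
--     try:
--         return int(h[0:2], 16), int(h[2:4], 16), int(h[4:6], 16)
--     except Exception:
--         return None
--
-- def color_distance(a: str, b: str) -> int:
--     """Distance by RGB squared error (lower is closer)."""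
--     ra = hex_to_rgb(a)
--     rb = hex_to_rgb(b)
--     if not ra or not rb:
--         return 10**9
--     return (ra[0]-rb[0])**2 + (ra[1]-rb[1])**2 + (ra[2]-rb[2])**2
--
-- def find_best_spool_with_ams(spools: list[dict], filament_material: str, filament_color: str | None, ams_trays: list[dict] | None) -> dict | None:
--     """Find best matching spool considering both JeevesUI colors and AMS tray colors."""
--     if not spools:
--         return None
--
--     # Filter by material
--     material_matches = [s for s in spools if (s.get("filament") or {}).get("material", "").upper() == filament_material.upper()]
--     candidates = material_matches if material_matches else spools
--
--     if not candidates: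
--         return None
--
--     # If we have both filament color and AMS trays, match both
--     if filament_color and ams_trays:
--         best_spool = None
--         best_dist = 10**9
--
--         for spool in candidates:
--             sp_hex = normalize_hex((spool.get("filament") or {}).get("colorHex"))
--             if not sp_hex:
--                 continue
--
--             for tray in ams_trays:
--                 if tray.get("type", "").upper() != filament_material.upper():
--                     continue
--                 tray_color = tray.get("color", "")
--
--                 # Distance: how close is tray to 3mf color + how close is spool to 3mf color
--                 tray_dist = color_distance(filament_color, tray_color)
--                 spool_dist = color_distance(filament_color, sp_hex)
--                 total_dist = tray_dist + spool_dist
--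
--                 if total_dist < best_dist:
--                     best_dist = total_dist
--                     best_spool = spool
--
--         return best_spool
--
--     # Fallback: match by color only
--     if filament_color:
--         exact = [s for s in candidates if normalize_hex((s.get("filament") or {}).get("colorHex")) == filament_color]
--         if exact:
--             return exact[0]
--
--         candidates = sorted(candidates, key=lambda sp: color_distance(filament_color, normalize_hex((sp.get("filament") or {}).get("colorHex")) or "FFFFFF"))
--
--     return candidates[0] if candidates else None
-- ===== SOURCE B (Python) =====
-- def normalize_hex(s):
--     if not s:
--         return None
--     return s.strip().lstrip("#").upper()
--
-- def hex_to_rgb(h):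
--     h = normalize_hex(h)
--     if not h or len(h) < 6:
--         return None
--     h = h[:6]
--     try:
--         return int(h[0:2], 16), int(h[2:4], 16), int(h[4:6], 16)
--     except Exception:
--         return None
--
-- def _dist(p, q):
--     """Squared RGB error between two parsed colors (None = unparseable)."""
--     if p is None or q is None:
--         return 10**9
--     return (p[0]-q[0])**2 + (p[1]-q[1])**2 + (p[2]-q[2])**2
--
-- def _hex_of(spool):
--     return normalize_hex((spool.get("filament") or {}).get("colorHex"))
--
-- def find_best_spool_with_ams(spools, filament_material, filament_color, ams_trays):
--     """Parse the target color once, reduce the trays to one minimal matching-tray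
--     distance, score each spool once, and pick minima by first-wins min() scans."""
--     mat = filament_material.upper()
--     cands = [s for s in spools
--              if (s.get("filament") or {}).get("material", "").upper() == mat] or spools
--
--     if filament_color and ams_trays:
--         target = hex_to_rgb(filament_color)
--         tray_min = None
--         for t in ams_trays:
--             if t.get("type", "").upper() == mat:
--                 d = _dist(target, hex_to_rgb(t.get("color", "")))
--                 tray_min = d if tray_min is None else min(tray_min, d)
--         if tray_min is None:
--             return None
--         scored = [(tray_min + _dist(target, hex_to_rgb(h)), s)
--                   for s in cands for h in [_hex_of(s)] if h]
--         best = min(scored, key=lambda p: p[0], default=None)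
--         return best[1] if best is not None and best[0] < 10**9 else None
--
--     if filament_color:
--         for s in cands:
--             if _hex_of(s) == filament_color:
--                 return s
--         target = hex_to_rgb(filament_color)
--         return min(cands,
--                    key=lambda s: _dist(target, hex_to_rgb(_hex_of(s) or "FFFFFF")),
--                    default=None)
--
--     return cands[0] if cands else None
-- ===== Notes on version B (the rewrite author's own statement) =====
-- stated objective: alternative
-- what changed: A's nested spool-by-tray loop becomes one tray pass computing the minimal matching-tray distance plus one scored-list pass over the spools picked by a first-wins min (the tray term is constant per spool), the target color is parsed to RGB once instead of per comparison, and the color-only fallback's sort-then-take-first becomes a single min-with-key scan.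
import Mathlib
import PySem

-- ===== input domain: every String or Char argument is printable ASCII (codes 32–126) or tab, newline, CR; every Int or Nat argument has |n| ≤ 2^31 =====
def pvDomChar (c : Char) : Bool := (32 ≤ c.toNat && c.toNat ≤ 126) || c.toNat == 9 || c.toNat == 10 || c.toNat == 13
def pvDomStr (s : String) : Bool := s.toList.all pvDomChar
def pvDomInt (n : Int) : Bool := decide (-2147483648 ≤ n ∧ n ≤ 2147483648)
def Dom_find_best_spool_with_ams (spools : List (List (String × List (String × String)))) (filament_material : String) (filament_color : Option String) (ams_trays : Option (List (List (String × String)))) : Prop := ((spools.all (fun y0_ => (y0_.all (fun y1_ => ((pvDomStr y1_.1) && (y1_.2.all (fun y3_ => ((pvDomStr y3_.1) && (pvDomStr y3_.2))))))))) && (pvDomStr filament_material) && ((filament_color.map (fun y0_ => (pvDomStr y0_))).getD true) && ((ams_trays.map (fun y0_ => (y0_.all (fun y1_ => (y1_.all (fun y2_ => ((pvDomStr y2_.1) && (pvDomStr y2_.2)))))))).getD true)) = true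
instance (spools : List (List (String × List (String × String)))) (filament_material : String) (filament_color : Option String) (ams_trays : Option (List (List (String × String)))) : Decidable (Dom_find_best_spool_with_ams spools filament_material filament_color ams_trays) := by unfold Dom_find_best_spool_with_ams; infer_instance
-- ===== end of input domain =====

-- B replaces A's nested spool-by-tray loop with one tray pass (minimal matching-tray distance)
-- plus one scored pass over the spools, parses the target color once, and replaces the
-- fallback's sort-then-take-first with a single first-wins min-with-key scan.
-- ===== PORT A =====
-- shared module helpers (normalize_hex / hex_to_rgb and dict lookups), used by both Pythons
-- .lstrip("#") ported by hand: dropWhile (· == '#') removes exactly the leading '#' characters (exact)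
def normHexS (s : String) : Option String :=
  if s = "" then none
  else some (PySem.Str.upper (String.ofList ((PySem.Str.strip s).toList.dropWhile (fun c => c == '#'))))

def normHexO : Option String → Option String
  | none => none
  | some s => normHexS s

def hexToRgb (s : String) : Option (Int × Int × Int) :=
  match normHexS s with
  | none => none
  | some h =>
    if PySem.Str.len h < 6 then none
    else
      let h6 := PySem.Str.slice h none (some 6)
      match PySem.Int.ofStrBase? (PySem.Str.slice h6 (some 0) (some 2)) 16,
            PySem.Int.ofStrBase? (PySem.Str.slice h6 (some 2) (some 4)) 16,
            PySem.Int.ofStrBase? (PySem.Str.slice h6 (some 4) (some 6)) 16 with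
      | some r, some g, some b => some (r, g, b)
      | _, _, _ => none

-- A's color_distance: re-parses both hex strings on every call
def colorDist (a b : String) : Int :=
  match hexToRgb a, hexToRgb b with
  | some ra, some rb => (ra.1 - rb.1) ^ 2 + (ra.2.1 - rb.2.1) ^ 2 + (ra.2.2 - rb.2.2) ^ 2
  | _, _ => 10 ^ 9

def spoolFil (s : List (String × List (String × String))) : List (String × String) :=
  (List.lookup "filament" s).getD []

def spoolMat (s : List (String × List (String × String))) : String :=
  PySem.Str.upper ((List.lookup "material" (spoolFil s)).getD "")

def spoolHex (s : List (String × List (String × String))) : Option String :=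
  normHexO (List.lookup "colorHex" (spoolFil s))

def trayType (t : List (String × String)) : String :=
  PySem.Str.upper ((List.lookup "type" t).getD "")

def trayColor (t : List (String × String)) : String :=
  (List.lookup "color" t).getD ""

-- normalize_hex(...) or "FFFFFF"
def orFFF : Option String → String
  | none => "FFFFFF"
  | some h => if h = "" then "FFFFFF" else h

def find_best_spool_with_ams (spools : List (List (String × List (String × String)))) (filament_material : String) (filament_color : Option String) (ams_trays : Option (List (List (String × String)))) : Option (List (String × List (String × String))) :=
  if spools = [] then none
  else
    let matUp := PySem.Str.upper filament_material
    let material_matches := spools.filter (fun s => spoolMat s == matUp)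
    let candidates := if material_matches = [] then spools else material_matches
    if candidates = [] then none
    else
      let fcT : Bool := match filament_color with | some c => c != "" | none => false
      let atT : Bool := match ams_trays with | some ts => !ts.isEmpty | none => false
      if fcT && atT then
        let c := filament_color.getD ""
        let trays := ams_trays.getD []
        (candidates.foldl (fun st spool =>
            match spoolHex spool with
            | none => st
            | some h =>
              if h = "" then st
              else
                trays.foldl (fun st2 tr =>
                  if !(trayType tr == matUp) then st2
                  else
                    let total := colorDist c (trayColor tr) + colorDist c h
                    if total < st2.2 then (some spool, total) else st2) st)
          ((none : Option (List (String × List (String × String)))), (10 ^ 9 : Int))).1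
      else if fcT then
        let c := filament_color.getD ""
        let exact := candidates.filter (fun s => spoolHex s == some c)
        match exact with
        | e :: _ => some e
        | [] =>
          (PySem.List.sorted candidates (fun sp => colorDist c (orFFF (spoolHex sp))) false).head?
      else candidates.head?

-- ===== PORT B =====
-- B's _dist: squared error between two ALREADY PARSED colors (the target is parsed once)
def dist2 : Option (Int × Int × Int) → Option (Int × Int × Int) → Int
  | some p, some q => (p.1 - q.1) ^ 2 + (p.2.1 - q.2.1) ^ 2 + (p.2.2 - q.2.2) ^ 2
  | _, _ => 10 ^ 9

-- one pass over the trays: running minimum of the matching trays' distances (Source B's for-loop)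
def minTrayB (matUp : String) (target : Option (Int × Int × Int)) : Option Int → List (List (String × String)) → Option Int
  | acc, [] => acc
  | acc, t :: ts =>
    minTrayB matUp target
      (if trayType t == matUp then
         match acc with
         | none => some (dist2 target (hexToRgb (trayColor t)))
         | some m => some (if m ≤ dist2 target (hexToRgb (trayColor t)) then m
                           else dist2 target (hexToRgb (trayColor t)))
       else acc) ts

-- python min(l, key=..., default=None): first-wins running minimum
def minKeyAux {α : Type} (key : α → Int) : α → List α → α
  | b, [] => b
  | b, x :: xs => minKeyAux key (if key x < key b then x else b) xs

def minKey {α : Type} (key : α → Int) : List α → Option α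
  | [] => none
  | x :: xs => some (minKeyAux key x xs)

-- Source B's scored-list comprehension: one (total, spool) pair per spool with a truthy hex
def scoredB (target : Option (Int × Int × Int)) (m : Int) (cands : List (List (String × List (String × String)))) : List (Int × List (String × List (String × String))) :=
  cands.flatMap (fun s =>
    match spoolHex s with
    | some h => if h = "" then [] else [((m + dist2 target (hexToRgb h) : Int), s)]
    | none => [])

def amsPickB (matUp : String) (target : Option (Int × Int × Int)) (trays : List (List (String × String))) (cands : List (List (String × List (String × String)))) : Option (List (String × List (String × String))) :=
  match minTrayB matUp target none trays with
  | none => none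
  | some m =>
    match minKey (fun p => p.1) (scoredB target m cands) with
    | some (d, s) => if d < 10 ^ 9 then some s else none
    | none => none

-- Source B's explicit first-exact-match loop
def findExactB (c : String) : List (List (String × List (String × String))) → Option (List (String × List (String × String)))
  | [] => none
  | s :: ss => if spoolHex s == some c then some s else findExactB c ss

def fallbackB (c : String) (cands : List (List (String × List (String × String)))) : Option (List (String × List (String × String))) :=
  match findExactB c cands with
  | some s => some s
  | none => minKey (fun s => dist2 (hexToRgb c) (hexToRgb (orFFF (spoolHex s)))) cands

def find_best_spool_with_ams_alt (spools : List (List (String × List (String × String)))) (filament_material : String) (filament_color : Option String) (ams_trays : Option (List (List (String × String)))) : Option (List (String × List (String × String))) :=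
  let matUp := PySem.Str.upper filament_material
  let mats := spools.filter (fun s => spoolMat s == matUp)
  let cands := if mats.isEmpty then spools else mats
  match filament_color, ams_trays with
  | some c, some (t :: ts) =>
    if c = "" then cands.head?
    else amsPickB matUp (hexToRgb c) (t :: ts) cands
  | some c, _ =>
    if c = "" then cands.head? else fallbackB c cands
  | none, _ => cands.head?

-- ===== PRECONDITION & SPEC =====
def Spec_find_best_spool_with_ams (spools : List (List (String × List (String × String)))) (filament_material : String) (filament_color : Option String) (ams_trays : Option (List (List (String × String)))) (out : Option (List (String × List (String × String)))) : Prop := out = find_best_spool_with_ams_alt spools filament_material filament_color ams_trays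
instance (spools : List (List (String × List (String × String)))) (filament_material : String) (filament_color : Option String) (ams_trays : Option (List (List (String × String)))) (out : Option (List (String × List (String × String)))) : Decidable (Spec_find_best_spool_with_ams spools filament_material filament_color ams_trays out) := by unfold Spec_find_best_spool_with_ams; infer_instance

-- ===== CLAIM (what is proved, stated in full; the proofs are below) =====
def Claim_equal_find_best_spool_with_ams : Prop := ∀ (spools : List (List (String × List (String × String)))) (filament_material : String) (filament_color : Option String) (ams_trays : Option (List (List (String × String)))), Dom_find_best_spool_with_ams spools filament_material filament_color ams_trays → Spec_find_best_spool_with_ams spools filament_material filament_color ams_trays (find_best_spool_with_ams spools filament_material filament_color ams_trays)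

-- ===== LEMMAS AND PROOFS =====

theorem colorDist_eq_dist2 (a b : String) : colorDist a b = dist2 (hexToRgb a) (hexToRgb b) := by
  unfold colorDist dist2
  rcases hexToRgb a with _ | ra <;> rcases hexToRgb b with _ | rb <;> rfl

-- A's running tray-minimum fold equals B's recursive minTrayB
theorem minTrayB_eq (matUp c : String) :
    ∀ (trays : List (List (String × String))) (acc : Option Int),
    trays.foldl (fun a tr =>
        if trayType tr == matUp then
          (match a with
            | none => some (colorDist c (trayColor tr))
            | some m => some (if colorDist c (trayColor tr) < m then colorDist c (trayColor tr) else m))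
        else a) acc
    = minTrayB matUp (hexToRgb c) acc trays := by
  intro trays
  induction trays with
  | nil => intro acc; rfl
  | cons t ts ih =>
    intro acc
    simp only [List.foldl_cons, minTrayB]
    rw [← ih]
    congr 1
    by_cases hp : trayType t == matUp
    · simp only [hp, if_true]
      cases acc with
      | none => simp [colorDist_eq_dist2]
      | some m =>
        simp only [colorDist_eq_dist2]
        congr 1
        rcases lt_or_ge (dist2 (hexToRgb c) (hexToRgb (trayColor t))) m with h | h
        · rw [if_pos h, if_neg (by omega)]
        · rw [if_neg (by omega), if_pos h]
    · simp [hp]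

-- `applyA acc st`: the effect of A's inner tray loop with current tray-minimum acc, spool v
def applyA {α : Type} (v : α) (sd : Int) (acc : Option Int) (st : Option α × Int) : Option α × Int :=
  match acc with
  | none => st
  | some m => if m + sd < st.2 then (some v, m + sd) else st

theorem applyA_step {α β : Type} (v : α) (sd : Int) (p : β → Bool) (td : β → Int)
    (acc : Option Int) (st : Option α × Int) (tr : β) :
    applyA v sd (if p tr then (match acc with
        | none => some (td tr)
        | some m => some (if td tr < m then td tr else m)) else acc) st
      = (if !(p tr) then applyA v sd acc st
         else if td tr + sd < (applyA v sd acc st).2 then (some v, td tr + sd)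
         else applyA v sd acc st) := by
  cases hp : p tr <;> cases acc <;> simp [applyA] <;> split_ifs <;>
    (try simp_all [Prod.ext_iff]) <;> omega

theorem inner_fold {α β : Type} (v : α) (sd : Int) (p : β → Bool) (td : β → Int) :
    ∀ (trays : List β) (acc : Option Int) (st : Option α × Int),
    trays.foldl (fun st2 tr =>
        if !(p tr) then st2
        else if td tr + sd < st2.2 then (some v, td tr + sd) else st2)
      (applyA v sd acc st)
    = applyA v sd (trays.foldl (fun a tr =>
        if p tr then (match a with
          | none => some (td tr)
          | some m => some (if td tr < m then td tr else m)) else a) acc) st := by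
  intro trays
  induction trays with
  | nil => intro acc st; rfl
  | cons tr ts ih =>
    intro acc st
    simp only [List.foldl_cons]
    rw [← applyA_step v sd p td acc st tr, ih]

theorem inner_fold_none {α β : Type} (v : α) (sd : Int) (p : β → Bool) (td : β → Int)
    (trays : List β) (st : Option α × Int) :
    trays.foldl (fun st2 tr =>
        if !(p tr) then st2
        else if td tr + sd < st2.2 then (some v, td tr + sd) else st2) st
    = applyA v sd (trays.foldl (fun a tr =>
        if p tr then (match a with
          | none => some (td tr)
          | some m => some (if td tr < m then td tr else m)) else a) none) st := by
  have h := inner_fold v sd p td trays none st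
  simpa [applyA] using h

theorem foldl_id {α β : Type} (f : β → α → β) (h : ∀ st x, f st x = st) :
    ∀ (l : List α) (st : β), l.foldl f st = st := by
  intro l
  induction l with
  | nil => intro st; rfl
  | cons x t ih => intro st; simp only [List.foldl_cons, h, ih]

-- A's nested loop over (spools × trays) decomposes into the tray-minimum and a threshold fold
theorem ams_eq (cands : List (List (String × List (String × String))))
    (trays : List (List (String × String))) (c matU : String) :
    (cands.foldl (fun st spool =>
        match spoolHex spool with
        | none => st
        | some h =>
          if h = "" then st
          else
            trays.foldl (fun st2 tr =>
              if !(trayType tr == matU) then st2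
              else
                if colorDist c (trayColor tr) + colorDist c h < st2.2 then
                  (some spool, colorDist c (trayColor tr) + colorDist c h)
                else st2) st)
      ((none : Option (List (String × List (String × String)))), (10 ^ 9 : Int))).1
    = (match trays.foldl (fun a tr =>
          if trayType tr == matU then
            (match a with
              | none => some (colorDist c (trayColor tr))
              | some m => some (if colorDist c (trayColor tr) < m then colorDist c (trayColor tr) else m))
          else a) (none : Option Int) with
        | none => none
        | some m =>
          (cands.foldl (fun st spool =>
              match spoolHex spool with
              | none => st
              | some h =>
                if h = "" then st
                else if m + colorDist c h < st.2 then (some spool, m + colorDist c h) else st)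
            ((none : Option (List (String × List (String × String)))), (10 ^ 9 : Int))).1) := by
  cases hmt : trays.foldl (fun a tr =>
      if trayType tr == matU then
        (match a with
          | none => some (colorDist c (trayColor tr))
          | some m => some (if colorDist c (trayColor tr) < m then colorDist c (trayColor tr) else m))
      else a) (none : Option Int) with
  | none =>
    rw [foldl_id]
    intro st spool
    cases hsp : spoolHex spool with
    | none => rfl
    | some h =>
      by_cases hh : h = ""
      · simp [hh]
      · simp only [hh]
        have := inner_fold_none spool (colorDist c h)
          (fun tr => trayType tr == matU) (fun tr => colorDist c (trayColor tr)) trays st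
        simp only at this
        rw [this, hmt]
        rfl
  | some m =>
    have hfg : (fun (st : Option (List (String × List (String × String))) × Int) spool =>
        match spoolHex spool with
        | none => st
        | some h =>
          if h = "" then st
          else
            trays.foldl (fun st2 tr =>
              if !(trayType tr == matU) then st2
              else
                if colorDist c (trayColor tr) + colorDist c h < st2.2 then
                  (some spool, colorDist c (trayColor tr) + colorDist c h)
                else st2) st)
        = (fun st spool =>
          match spoolHex spool with
          | none => st
          | some h =>
            if h = "" then st
            else if m + colorDist c h < st.2 then (some spool, m + colorDist c h) else st) := by
      funext st spool
      cases hsp : spoolHex spool with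
      | none => rfl
      | some h =>
        by_cases hh : h = ""
        · simp [hh]
        · simp only [hh]
          have := inner_fold_none spool (colorDist c h)
            (fun tr => trayType tr == matU) (fun tr => colorDist c (trayColor tr)) trays st
          simp only at this
          rw [this, hmt]
          rfl
    rw [hfg]

-- the first-wins running-minimum merge, named so that every lemma speaks about the same term
def mergeMin {α : Type} (key : α → Int) (acc : Option α) (x : α) : Option α :=
  match acc with
  | none => some x
  | some q => if key x < key q then some x else some q

theorem minKeyAux_foldl {α : Type} (key : α → Int) :
    ∀ (xs : List α) (b : α),
    xs.foldl (mergeMin key) (some b) = some (minKeyAux key b xs) := by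
  intro xs
  induction xs with
  | nil => intro b; rfl
  | cons x t ih =>
    intro b
    simp only [List.foldl_cons, minKeyAux]
    rw [← ih]
    congr 1
    simp only [mergeMin]
    split_ifs <;> rfl

theorem minKey_eq_foldl {α : Type} (key : α → Int) (l : List α) :
    minKey key l = l.foldl (mergeMin key) none := by
  cases l with
  | nil => rfl
  | cons x t => simp only [minKey, List.foldl_cons, mergeMin]; rw [minKeyAux_foldl]

-- threshold-fold state as a function of the running first-wins minimum pair
def threshP {α : Type} : Option (Int × α) → Option α × Int
  | none => (none, 10 ^ 9)
  | some (d, s) => if d < 10 ^ 9 then (some s, d) else (none, 10 ^ 9)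

theorem threshP_step {α : Type} (b : Option (Int × α)) (p : Int × α) :
    (if p.1 < (threshP b).2 then (some p.2, p.1) else threshP b)
    = threshP (mergeMin (fun q => q.1) b p) := by
  rcases b with _ | ⟨d0, s0⟩ <;> obtain ⟨d, s⟩ := p <;>
    simp [threshP, mergeMin] <;> split_ifs <;> (try simp_all [Prod.ext_iff]) <;> omega

theorem threshP_foldl {α : Type} :
    ∀ (l : List (Int × α)) (b : Option (Int × α)),
    l.foldl (fun st p => if p.1 < st.2 then (some p.2, p.1) else st) (threshP b)
    = threshP (l.foldl (mergeMin (fun q => q.1)) b) := by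
  intro l
  induction l with
  | nil => intro b; rfl
  | cons p t ih =>
    intro b
    simp only [List.foldl_cons]
    rw [threshP_step, ih]

theorem foldl_over_flatMap {α β γ : Type} (g : β → List α) (f : γ → α → γ) :
    ∀ (l : List β) (st : γ),
    l.foldl (fun st x => (g x).foldl f st) st = (l.flatMap g).foldl f st := by
  intro l
  induction l with
  | nil => intro st; rfl
  | cons x t ih => intro st; simp only [List.foldl_cons, List.flatMap_cons, List.foldl_append, ih]

-- A's threshold fold over the spools equals B's min over the scored list
theorem spoolScan_eq (cands : List (List (String × List (String × String)))) (c : String) (m : Int) :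
    (cands.foldl (fun st spool =>
        match spoolHex spool with
        | none => st
        | some h =>
          if h = "" then st
          else if m + colorDist c h < st.2 then (some spool, m + colorDist c h) else st)
      ((none : Option (List (String × List (String × String)))), (10 ^ 9 : Int))).1
    = match minKey (fun p => p.1) (scoredB (hexToRgb c) m cands) with
      | some (d, s) => if d < 10 ^ 9 then some s else none
      | none => none := by
  have hfun : (fun (st : Option (List (String × List (String × String))) × Int) spool =>
      match spoolHex spool with
      | none => st
      | some h =>
        if h = "" then st
        else if m + colorDist c h < st.2 then (some spool, m + colorDist c h) else st)
      = (fun st spool =>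
        ((match spoolHex spool with
          | some h => if h = "" then [] else [((m + dist2 (hexToRgb c) (hexToRgb h) : Int), spool)]
          | none => ([] : List (Int × List (String × List (String × String))))).foldl
            (fun st (p : Int × List (String × List (String × String))) => if p.1 < st.2 then (some p.2, p.1) else st) st)) := by
    funext st spool
    cases hsp : spoolHex spool with
    | none => rfl
    | some h =>
      by_cases hh : h = ""
      · simp [hh]
      · simp [hh, colorDist_eq_dist2]
  rw [hfun, foldl_over_flatMap]
  have hinit : ((none : Option (List (String × List (String × String)))), (10 ^ 9 : Int))
      = threshP (none : Option (Int × List (String × List (String × String)))) := rfl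
  rw [hinit, threshP_foldl, ← scoredB, ← minKey_eq_foldl (fun q : Int × List (String × List (String × String)) => q.1)]
  cases hmk : minKey (fun p => p.1) (scoredB (hexToRgb c) m cands) with
  | none => rfl
  | some p => obtain ⟨d, s⟩ := p; simp only [threshP]; split_ifs <;> rfl

-- head of a stable insertion-sort step equals the running-min step
theorem head?_insertBy {α : Type} (key : α → Int) (x : α) (ys : List α) :
    (PySem.List.insertBy (fun a b => decide (key a < key b)) x ys).head?
      = mergeMin key ys.head? x := by
  cases ys with
  | nil => rfl
  | cons y t =>
    by_cases h : key x < key y <;> simp [PySem.List.insertBy, mergeMin, h]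

theorem head?_foldl_insertBy {α : Type} (key : α → Int) :
    ∀ (xs ys : List α),
    (xs.foldl (fun acc x => PySem.List.insertBy (fun a b => decide (key a < key b)) x acc) ys).head?
      = xs.foldl (mergeMin key) ys.head? := by
  intro xs
  induction xs with
  | nil => intro ys; rfl
  | cons x t ih =>
    intro ys
    simp only [List.foldl_cons]
    rw [ih, head?_insertBy]

theorem head?_sorted_eq_minKey {α : Type} (xs : List α) (key : α → Int) :
    (PySem.List.sorted xs key false).head? = minKey key xs := by
  rw [PySem.List.sorted_eq_foldl_insertBy, head?_foldl_insertBy, minKey_eq_foldl]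
  rfl

theorem findExactB_eq (c : String) :
    ∀ (l : List (List (String × List (String × String)))),
    findExactB c l = l.find? (fun s => spoolHex s == some c) := by
  intro l
  induction l with
  | nil => rfl
  | cons s ss ih =>
    simp only [findExactB, List.find?]
    cases h : spoolHex s == some c <;> simp [ih]

-- A's fallback (filter-first, else sort-and-take-head) equals B's fallbackB
theorem fallback_eq (cands : List (List (String × List (String × String)))) (c : String) :
    (match cands.filter (fun s => spoolHex s == some c) with
      | e :: _ => some e
      | [] => (PySem.List.sorted cands (fun sp => colorDist c (orFFF (spoolHex sp))) false).head?)
    = fallbackB c cands := by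
  unfold fallbackB
  rw [findExactB_eq, ← List.head?_filter]
  cases hf : cands.filter (fun s => spoolHex s == some c) with
  | nil =>
    simp only [List.head?_nil]
    rw [head?_sorted_eq_minKey]
    rfl
  | cons e t => simp

-- B returns none on an empty spool list, whatever the other arguments are
theorem alt_nil (fm : String) (fc : Option String) (at_ : Option (List (List (String × String)))) :
    find_best_spool_with_ams_alt [] fm fc at_ = none := by
  unfold find_best_spool_with_ams_alt
  rcases fc with _ | c
  · rcases at_ with _ | ts <;> rfl
  · rcases at_ with _ | (_ | ⟨t, ts⟩)
    · by_cases hc : c = "" <;> simp [hc, fallbackB, findExactB, minKey]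
    · by_cases hc : c = "" <;> simp [hc, fallbackB, findExactB, minKey]
    · by_cases hc : c = "" <;>
        simp [hc, amsPickB, scoredB, minKey] <;>
        cases minTrayB (PySem.Str.upper fm) (hexToRgb c) none (t :: ts) <;> rfl

-- ===== VERDICT (by name: the statement is the Claim_ definition above) =====
theorem find_best_spool_with_ams_spec : Claim_equal_find_best_spool_with_ams := by
  intro spools fm fc at_ _
  unfold Spec_find_best_spool_with_ams
  by_cases hs : spools = []
  · rw [hs, alt_nil]
    simp [find_best_spool_with_ams]
  · unfold find_best_spool_with_ams find_best_spool_with_ams_alt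
    simp only [if_neg hs]
    set mm := spools.filter (fun s => spoolMat s == PySem.Str.upper fm) with hmm
    have hcands : (if mm.isEmpty then spools else mm) = (if mm = [] then spools else mm) := by
      by_cases h0 : mm = [] <;> simp_all
    rw [hcands]
    set cands := if mm = [] then spools else mm with hc
    have hcne : ¬ cands = [] := by
      rw [hc]; split_ifs with h0
      · exact hs
      · exact h0
    rw [if_neg hcne]
    cases fc with
    | none => rcases at_ with _ | ts <;> simp
    | some cv =>
      by_cases hcv : cv = ""
      · rcases at_ with _ | (_ | ⟨t, ts⟩) <;> simp [hcv]
      · cases at_ with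
        | none =>
          simp only [Option.getD_some, bne_iff_ne, ne_eq, hcv, not_false_eq_true]
          simpa [hcv] using fallback_eq cands cv
        | some ts =>
          cases ts with
          | nil =>
            simpa [hcv] using fallback_eq cands cv
          | cons t ts' =>
            have hne : (t :: ts').isEmpty = false := by simp
            simp only [hne, Option.getD_some, Bool.not_false, Bool.and_true, bne_iff_ne, ne_eq,
              hcv, not_false_eq_true, if_pos]
            rw [ams_eq cands (t :: ts') cv (PySem.Str.upper fm)]
            unfold amsPickB
            rw [minTrayB_eq]
            cases minTrayB (PySem.Str.upper fm) (hexToRgb cv) none (t :: ts') with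
            | none => rfl
            | some m => simpa using spoolScan_eq cands cv m
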